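-- pv_equiv track=rewrite | github.com/GeorgeBasiev/ODYSSEY | modules/graph_construction.py | _check_column_match
-- ===== SOURCE A (Python) =====
-- from typing import Dict, List, Union, Set, Tuple, Optional
--
-- def _check_column_match(attr: Dict, target_columns: List[str]) -> bool:
--     """Проверяет, соответствует ли ячейка целевому столбцу"""
--     if not target_columns:
--         return True
--
--     table = attr.get("table", "")
--     col = attr.get("col", "")
--
--     for target in target_columns:
--         if "." in target:
--             target_table, target_col = target.split(".", 1)
--             if table == target_table and col == target_col:
--                 return True
--         else:
--
--             if col == target:
--                 return True
--
--     return False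
-- ===== SOURCE B (Python) =====
-- def _check_column_match(attr, target_columns):
--     """Build at most two exact match keys from attr, then scan the targets for membership
--     (no per-target splitting)."""
--     if not target_columns:
--         return True
--     table = attr.get("table", "")
--     col = attr.get("col", "")
--     wanted = set()
--     if "." not in col:
--         wanted.add(col)
--     if "." not in table:
--         wanted.add(table + "." + col)
--     return any(t in wanted for t in target_columns)
-- ===== Notes on version B (the rewrite author's own statement) =====
-- stated objective: alternative
-- what changed: Inverts the direction of matching: instead of parsing every target with split('.',1) and comparing pieces against attr, B precomputes from attr the at most two exact strings a target could be (col if dot-free, and table+'.'+col if table is dot-free) and merely scans the targets for membership in that two-element set, with no splitting at all.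
import Mathlib
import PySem

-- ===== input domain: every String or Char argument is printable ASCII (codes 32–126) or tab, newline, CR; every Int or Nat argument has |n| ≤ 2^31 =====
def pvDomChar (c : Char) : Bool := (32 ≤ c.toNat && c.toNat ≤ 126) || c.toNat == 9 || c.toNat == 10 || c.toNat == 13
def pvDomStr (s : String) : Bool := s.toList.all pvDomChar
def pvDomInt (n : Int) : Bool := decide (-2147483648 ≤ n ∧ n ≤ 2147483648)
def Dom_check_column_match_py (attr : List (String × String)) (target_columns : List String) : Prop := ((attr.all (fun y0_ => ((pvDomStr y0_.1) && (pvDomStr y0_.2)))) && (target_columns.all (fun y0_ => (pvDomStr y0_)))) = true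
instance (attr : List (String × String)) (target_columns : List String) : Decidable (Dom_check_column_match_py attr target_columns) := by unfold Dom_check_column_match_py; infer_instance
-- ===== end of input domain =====

-- B inverts the matching direction: instead of splitting every target on '.', it
-- precomputes from attr the at most two strings a matching target could be and
-- scans the targets for membership in that set (alternative; same cost).

-- ===== PORT A =====
-- the for-loop with early return, one target at a time
def checkLoopA (table col : String) : List String → Bool
  | [] => false
  | target :: rest =>
    if PySem.Str.isIn "." target then
      let parts := (PySem.Str.splitMax? target "." 1).getD []
      let target_table := parts.getD 0 ""
      let target_col := parts.getD 1 ""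
      if table == target_table && col == target_col then true
      else checkLoopA table col rest
    else
      if col == target then true
      else checkLoopA table col rest

def check_column_match_py (attr : List (String × String)) (target_columns : List String) : Bool :=
  if target_columns.isEmpty then true
  else
    let table := PySem.Dict.getD (PySem.Dict.mk attr) "table" ""
    let col := PySem.Dict.getD (PySem.Dict.mk attr) "col" ""
    checkLoopA table col target_columns

-- ===== PORT B =====
-- the 'wanted' set of at most two candidate strings built from attr
def wantedB (table col : String) : PySem.Set String :=
  let w0 := PySem.Set.empty
  let w1 := if PySem.Str.isIn "." col then w0 else PySem.Set.add w0 col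
  if PySem.Str.isIn "." table then w1 else PySem.Set.add w1 (table ++ "." ++ col)

def check_column_match_py_alt (attr : List (String × String)) (target_columns : List String) : Bool :=
  if target_columns.isEmpty then true
  else
    let table := PySem.Dict.getD (PySem.Dict.mk attr) "table" ""
    let col := PySem.Dict.getD (PySem.Dict.mk attr) "col" ""
    let wanted := wantedB table col
    target_columns.any (fun t => PySem.Set.contains wanted t)

-- ===== PRECONDITION & SPEC =====
def Spec_check_column_match_py (attr : List (String × String)) (target_columns : List String) (out : Bool) : Prop := out = check_column_match_py_alt attr target_columns
instance (attr : List (String × String)) (target_columns : List String) (out : Bool) : Decidable (Spec_check_column_match_py attr target_columns out) := by unfold Spec_check_column_match_py; infer_instance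

-- ===== CLAIM (what is proved, stated in full; the proofs are below) =====
def Claim_equal_check_column_match_py : Prop := ∀ (attr : List (String × String)) (target_columns : List String), Dom_check_column_match_py attr target_columns → Spec_check_column_match_py attr target_columns (check_column_match_py attr target_columns)

-- ===== LEMMAS AND PROOFS =====

-- whether a single target matches (table, col) in A's loop body
def matchesTgt (table col t : String) : Bool :=
  if PySem.Str.isIn "." t then
    let parts := (PySem.Str.splitMax? t "." 1).getD []
    table == parts.getD 0 "" && col == parts.getD 1 ""
  else
    col == t

theorem checkLoopA_cons (table col t : String) (rest : List String) :
    checkLoopA table col (t :: rest)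
      = (matchesTgt table col t || checkLoopA table col rest) := by
  simp only [checkLoopA, matchesTgt]
  split_ifs <;> simp_all

theorem checkLoopA_eq_any (table col : String) (ts : List String) :
    checkLoopA table col ts = ts.any (matchesTgt table col) := by
  induction ts with
  | nil => rfl
  | cons t rest ih => rw [checkLoopA_cons, List.any_cons, ih]

-- singleton infix is membership
theorem singleton_infix_iff_mem (c : Char) (l : List Char) :
    [c] <:+: l ↔ c ∈ l := by
  constructor
  · intro h; exact h.sublist.mem (List.mem_singleton_self c)
  · intro h
    obtain ⟨s, t, rfl⟩ := List.append_of_mem h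
    exact ⟨s, t, by simp⟩

theorem isInDot_iff (s : String) :
    PySem.Chars.isIn ['.'] s.toList = true ↔ '.' ∈ s.toList := by
  rw [PySem.Chars.isIn_iff_infix]
  exact singleton_infix_iff_mem '.' s.toList

theorem isInDot_false_iff (s : String) :
    PySem.Chars.isIn ['.'] s.toList = false ↔ '.' ∉ s.toList := by
  rw [← Bool.not_eq_true, not_iff_not]
  exact isInDot_iff s

-- the inner scanner of splitOnMax with maxsplit already 0: dumps the rest
theorem go_zero (fuel : Nat) (l cur : List Char) (acc : List (List Char)) :
    PySem.Chars.splitOnMax.go ['.'] fuel 0 l cur acc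
      = ((cur.reverse ++ l) :: acc).reverse := by
  cases fuel with
  | zero => simp [PySem.Chars.splitOnMax.go]
  | succ fuel' => cases l <;> simp [PySem.Chars.splitOnMax.go]

-- the scanner with maxsplit 1: split at the first '.' if any
theorem go_one (l : List Char) : ∀ (fuel : Nat) (cur : List Char) (acc : List (List Char)),
    l.length < fuel →
    PySem.Chars.splitOnMax.go ['.'] fuel 1 l cur acc
      = acc.reverse ++ (if '.' ∈ l
          then [cur.reverse ++ l.takeWhile (· ≠ '.'), (l.dropWhile (· ≠ '.')).tail]
          else [cur.reverse ++ l]) := by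
  induction l with
  | nil =>
    intro fuel cur acc h
    cases fuel with
    | zero => omega
    | succ f => simp [PySem.Chars.splitOnMax.go]
  | cons c rest ih =>
    intro fuel cur acc h
    cases fuel with
    | zero => omega
    | succ f =>
      by_cases hc : c = '.'
      · subst hc
        simp only [PySem.Chars.splitOnMax.go, List.isPrefixOf, if_neg (by omega : ¬(1:Nat) = 0)]
        simp [go_zero]
      · have hpre : List.isPrefixOf ['.'] (c :: rest) = false := by
          simp [List.isPrefixOf]
          exact fun h' => hc h'.symm
        simp only [PySem.Chars.splitOnMax.go, hpre, Bool.false_eq_true, if_false,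
          if_neg (by omega : ¬(1:Nat) = 0)]
        rw [ih f (c :: cur) acc (by simpa using Nat.lt_of_succ_lt_succ h)]
        by_cases hm : '.' ∈ rest <;>
          simp [hm, hc, Ne.symm hc]

theorem splitOnMax_dot_one (l : List Char) :
    PySem.Chars.splitOnMax l ['.'] 1
      = (if '.' ∈ l
          then [l.takeWhile (· ≠ '.'), (l.dropWhile (· ≠ '.')).tail]
          else [l]) := by
  unfold PySem.Chars.splitOnMax
  rw [if_neg (by omega : ¬(1:Int) < 0)]
  have := go_one l (l.length + 1) [] [] (Nat.lt_succ_self _)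
  simpa using this

-- takeWhile/dropWhile of a list known to be T ++ '.'::C with '.' ∉ T
theorem takeWhile_no_dot (T C : List Char) (hT : '.' ∉ T) :
    (T ++ '.' :: C).takeWhile (· ≠ '.') = T ∧
    (T ++ '.' :: C).dropWhile (· ≠ '.') = '.' :: C := by
  induction T with
  | nil => simp
  | cons a T' ih =>
    have ha : a ≠ '.' := fun h => hT (h ▸ List.mem_cons_self ..)
    have hT' : '.' ∉ T' := fun h => hT (List.mem_cons_of_mem _ h)
    obtain ⟨h1, h2⟩ := ih hT'
    constructor
    · rw [List.cons_append, List.takeWhile_cons, if_pos (by simp [ha]), h1]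
    · rw [List.cons_append, List.dropWhile_cons, if_pos (by simp [ha]), h2]

-- characterization of the '.'-containing case of A's per-target test
theorem dot_match_iff (T C L : List Char) (hL : '.' ∈ L) :
    (T = L.takeWhile (· ≠ '.') ∧ C = (L.dropWhile (· ≠ '.')).tail)
      ↔ ('.' ∉ T ∧ L = T ++ '.' :: C) := by
  constructor
  · rintro ⟨rfl, rfl⟩
    refine ⟨fun h => ?_, ?_⟩
    · have := List.mem_takeWhile_imp h; simp at this
    · have hdw : L.dropWhile (· ≠ '.') ≠ [] := by
        intro h0
        have : ∀ x ∈ L, x ≠ '.' := by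
          intro x hx
          have := List.dropWhile_eq_nil_iff.mp h0 x hx
          simpa using this
        exact this '.' hL rfl
      have hhead : (L.dropWhile (· ≠ '.')).head hdw = '.' := by
        have := List.head_dropWhile_not (p := fun x => x ≠ '.') hdw
        simpa using this
      conv_lhs => rw [← List.takeWhile_append_dropWhile (p := fun x => x ≠ '.') (l := L)]
      congr 1
      obtain ⟨x, xs, hx⟩ := List.exists_cons_of_ne_nil hdw
      have hx' : x = '.' := by
        have h9 : (L.dropWhile (fun c => decide (c ≠ '.'))).head? = some '.' := by
          rw [List.head?_eq_some_head hdw, hhead]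
        rw [hx] at h9
        simpa using h9
      rw [hx, hx']
      simp
  · rintro ⟨hT, rfl⟩
    obtain ⟨h1, h2⟩ := takeWhile_no_dot T C hT
    rw [h1, h2]
    exact ⟨rfl, rfl⟩

theorem string_eq_iff_toList (s t : String) : s = t ↔ s.toList = t.toList :=
  ⟨fun h => h ▸ rfl, fun h => by
    have h2 := congrArg String.ofList h
    simpa using h2⟩

-- B's wanted set membership
theorem contains_wantedB (table col t : String) :
    PySem.Set.contains (wantedB table col) t
      = ((!PySem.Str.isIn "." col && t == col)
          || (!PySem.Str.isIn "." table && t == table ++ "." ++ col)) := by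
  have htl : ("." : String).toList = ['.'] := rfl
  unfold wantedB
  simp only [PySem.Str.isIn_eq, htl]
  rw [Bool.eq_iff_iff]
  split_ifs <;>
    simp_all [PySem.Set.empty]

-- the per-target equivalence
theorem matchesTgt_eq_contains (table col t : String) :
    matchesTgt table col t = PySem.Set.contains (wantedB table col) t := by
  rw [contains_wantedB, Bool.eq_iff_iff]
  unfold matchesTgt
  have htl : ("." : String).toList = ['.'] := rfl
  simp only [PySem.Str.isIn_eq, htl, beq_iff_eq, Bool.and_eq_true, Bool.or_eq_true,
    Bool.not_eq_true']
  by_cases hd : PySem.Chars.isIn ['.'] t.toList = true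
  · have hmem : '.' ∈ t.toList := (isInDot_iff t).mp hd
    rw [if_pos hd]
    have hsplit : (PySem.Str.splitMax? t "." 1).getD []
        = [String.ofList (t.toList.takeWhile (fun x => decide (x ≠ '.'))),
           String.ofList ((t.toList.dropWhile (fun x => decide (x ≠ '.'))).tail)] := by
      unfold PySem.Str.splitMax? PySem.Chars.splitMax?
      rw [htl, if_neg (by simp : ¬(['.'] : List Char).isEmpty = true), splitOnMax_dot_one,
        if_pos hmem]
      rfl
    rw [hsplit]
    simp only [List.getD_cons_zero, List.getD_cons_succ, Bool.and_eq_true, beq_iff_eq]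
    constructor
    · rintro ⟨h1, h2⟩
      have h1' : table.toList = t.toList.takeWhile (fun x => decide (x ≠ '.')) := by
        rw [h1]; simp
      have h2' : col.toList = (t.toList.dropWhile (fun x => decide (x ≠ '.'))).tail := by
        rw [h2]; simp
      obtain ⟨hnT, hLeq⟩ := (dot_match_iff table.toList col.toList t.toList hmem).mp ⟨h1', h2'⟩
      right
      refine ⟨(isInDot_false_iff table).mpr hnT, ?_⟩
      rw [string_eq_iff_toList]
      simpa [htl] using hLeq
    · rintro (⟨hc, rfl⟩ | ⟨ht2, heq⟩)
      · simp_all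
      · have hnT : '.' ∉ table.toList := (isInDot_false_iff table).mp ht2
        have hLeq : t.toList = table.toList ++ '.' :: col.toList := by
          rw [string_eq_iff_toList] at heq
          simpa [htl] using heq
        obtain ⟨h1', h2'⟩ := (dot_match_iff table.toList col.toList t.toList hmem).mpr ⟨hnT, hLeq⟩
        constructor
        · rw [string_eq_iff_toList]; simpa using h1'
        · rw [string_eq_iff_toList]; simpa using h2'
  · have hd' : PySem.Chars.isIn ['.'] t.toList = false := by simpa using hd
    have hnmem : '.' ∉ t.toList := (isInDot_false_iff t).mp hd'
    rw [if_neg hd]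
    simp only [beq_iff_eq]
    constructor
    · intro hct
      exact Or.inl ⟨by rw [hct]; exact hd', hct.symm⟩
    · rintro (⟨hc, rfl⟩ | ⟨ht2, heq⟩)
      · rfl
      · exfalso
        apply hnmem
        rw [string_eq_iff_toList] at heq
        rw [heq]
        simp [htl]

-- ===== VERDICT (by name: the statement is the Claim_ definition above) =====
theorem check_column_match_py_spec : Claim_equal_check_column_match_py := by
  intro attr target_columns _
  unfold Spec_check_column_match_py check_column_match_py check_column_match_py_alt
  by_cases he : target_columns.isEmpty
  · simp [he]
  · simp only [he, if_neg, Bool.false_eq_true, not_false_iff]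
    rw [checkLoopA_eq_any]
    congr 1
    funext t
    exact matchesTgt_eq_contains _ _ t
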